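-- pv_equiv track=rewrite | github.com/aircas-ambrose/BPOT | code/compute_whole_metric.py | collect_all_ngrams
-- ===== SOURCE A (Python) =====
-- def collect_all_ngrams(sents, n=4):
--     ngrams = []
--     for sent in sents:
--         tokens = sent.split(' ')
--         if len(tokens) >= n:
--             for i in range(len(tokens)-n+1):
--                 ngrams.append(' '.join(tokens[i:i+n]))
--     return ngrams
-- ===== SOURCE B (Python) =====
-- def collect_all_ngrams(sents, n=4):
--     # Single streaming pass: maintain a sliding window buffer of the last tokens
--     # (append + pop front) instead of extracting each n-gram by index slicing.
--     ngrams = []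
--     for sent in sents:
--         window = []
--         for tok in sent.split(' '):
--             window.append(tok)
--             if len(window) == n:
--                 ngrams.append(' '.join(window))
--                 window.pop(0)
--     return ngrams
-- ===== Notes on version B (the rewrite author's own statement) =====
-- stated objective: alternative
-- what changed: A extracts each n-gram by an index loop with slicing; B streams the tokens once, maintaining a sliding-window buffer (append each token, emit and pop the front when the buffer reaches size n), so no slices and no length guard are needed.
-- outside the precondition, e.g. on collect_all_ngrams(['a b'], 0): A returns ['', '', ''], B returns []; on collect_all_ngrams(['a b c'], -1): A returns ['a b', '', '', '', ''], B returns []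
import Mathlib
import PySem

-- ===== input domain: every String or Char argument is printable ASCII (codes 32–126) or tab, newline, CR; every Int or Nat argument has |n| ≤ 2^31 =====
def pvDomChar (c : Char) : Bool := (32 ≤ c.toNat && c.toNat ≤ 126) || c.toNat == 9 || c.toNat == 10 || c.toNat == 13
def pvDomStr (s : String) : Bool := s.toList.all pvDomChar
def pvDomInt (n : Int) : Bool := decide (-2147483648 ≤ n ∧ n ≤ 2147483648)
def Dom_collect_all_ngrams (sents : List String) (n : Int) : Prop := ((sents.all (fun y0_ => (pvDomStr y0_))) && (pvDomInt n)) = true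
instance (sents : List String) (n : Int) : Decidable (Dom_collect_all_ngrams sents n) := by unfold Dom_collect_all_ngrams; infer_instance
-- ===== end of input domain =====

-- B streams the tokens once with a sliding-window buffer (append, emit, pop front)
-- instead of A's index loop with slicing (alternative decomposition, same cost);
-- outside Pre_ (n ≤ 0) A returns slicing artefacts that B does not copy (B returns []).

-- ===== PORT A =====
def collect_all_ngrams (sents : List String) (n : Int) : List String :=
  sents.foldl (fun ngrams sent =>
    -- sent.split(' '): sep " " is nonempty, so split? returns some; getD [] is exact
    let tokens := (PySem.Str.split? sent " ").getD []
    if (tokens.length : Int) ≥ n then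
      (PySem.List.pyRange 0 ((tokens.length : Int) - n + 1) 1).foldl
        (fun ngrams i =>
          ngrams ++ [PySem.Str.join " " (PySem.List.slice tokens (some i) (some (i + n)))])
        ngrams
    else ngrams) []

-- ===== PORT B =====
def collect_all_ngrams_alt (sents : List String) (n : Int) : List String :=
  sents.foldl (fun ngrams sent =>
    -- sent.split(' '): sep " " is nonempty, so split? returns some; getD [] is exact
    let tokens := (PySem.Str.split? sent " ").getD []
    (tokens.foldl (fun st tok =>
        let window := st.1 ++ [tok]
        if (window.length : Int) = n then
          (window.drop 1, st.2 ++ [PySem.Str.join " " window])   -- emit, then pop(0)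
        else (window, st.2)) ([], ngrams)).2) []

-- ===== PRECONDITION & SPEC =====
-- Pre_ restricts to positive n, the natural domain of an n-gram collector: for n ≤ 0
-- A's always-true length guard and its empty/negative-stop slices return artefact grams
-- (e.g. one empty string per window for n = 0), which B does not copy (B returns []).
def Pre_collect_all_ngrams (sents : List String) (n : Int) : Prop := 1 ≤ n
instance (sents : List String) (n : Int) : Decidable (Pre_collect_all_ngrams sents n) := by
  unfold Pre_collect_all_ngrams; infer_instance

def pvWitness_collect_all_ngrams : List String × Int := (["a b c", "d e"], 2)

def Spec_collect_all_ngrams (sents : List String) (n : Int) (out : List String) : Prop :=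
  out = collect_all_ngrams_alt sents n
instance (sents : List String) (n : Int) (out : List String) : Decidable (Spec_collect_all_ngrams sents n out) := by
  unfold Spec_collect_all_ngrams; infer_instance

-- ===== CLAIM (what is proved, stated in full; the proofs are below) =====
def Claim_equal_collect_all_ngrams : Prop := ∀ (sents : List String) (n : Int), Dom_collect_all_ngrams sents n → Pre_collect_all_ngrams sents n → Spec_collect_all_ngrams sents n (collect_all_ngrams sents n)

-- ===== LEMMAS AND PROOFS =====

-- A's per-sentence step, in closed window form
lemma bodyA_eq (tokens : List String) (n : Int) (hn : 1 ≤ n) (acc : List String) :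
    (if (tokens.length : Int) ≥ n then
        (PySem.List.pyRange 0 ((tokens.length : Int) - n + 1) 1).foldl
          (fun a i => a ++ [PySem.Str.join " " (PySem.List.slice tokens (some i) (some (i + n)))]) acc
      else acc)
    = acc ++ (List.range (tokens.length + 1 - n.toNat)).map
        (fun j => PySem.Str.join " " ((tokens.drop j).take n.toNat)) := by
  by_cases h : (tokens.length : Int) ≥ n
  · rw [if_pos h, PySem.List.foldl_append_singleton_eq_map, PySem.List.pyRange_one, List.map_map]
    have hcnt : (((tokens.length : Int) - n + 1) - 0).toNat = tokens.length + 1 - n.toNat := by omega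
    rw [hcnt]
    congr 1
    refine List.map_congr_left fun k _ => ?_
    simp only [Function.comp]
    congr 1
    rw [PySem.List.slice_toNat tokens (by omega) (by omega)]
    have h1 : ((0 : Int) + k).toNat = k := by omega
    rw [h1]
    congr 1
    omega
  · rw [if_neg h]
    have : tokens.length + 1 - n.toNat = 0 := by omega
    simp [this]

-- invariant of B's streaming pass: with a buffer w shorter than m, folding the
-- remaining tokens emits exactly the windows of w ++ ts that end inside ts
lemma streamFold (m : Nat) : ∀ (ts w acc : List String), w.length + 1 ≤ m →
    (ts.foldl (fun st tok =>
        let window := st.1 ++ [tok]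
        if window.length = m then (window.drop 1, st.2 ++ [PySem.Str.join " " window])
        else (window, st.2)) (w, acc)).2
    = acc ++ (List.range (w.length + ts.length + 1 - m)).map
        (fun j => PySem.Str.join " " (((w ++ ts).drop j).take m)) := by
  intro ts
  induction ts with
  | nil =>
    intro w acc hw
    have : w.length + 0 + 1 - m = 0 := by omega
    simp [this]
  | cons tok ts' ih =>
    intro w acc hw
    rw [List.foldl_cons]
    dsimp only
    by_cases h : w.length + 1 = m
    · rw [if_pos (by simp [h])]
      rw [ih ((w ++ [tok]).drop 1) _ (by simp; omega)]
      have hlen1 : ((w ++ [tok]).drop 1).length = w.length := by simp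
      have hcnt1 : ((w ++ [tok]).drop 1).length + ts'.length + 1 - m = ts'.length := by
        rw [hlen1]; omega
      have hcnt2 : w.length + (tok :: ts').length + 1 - m = ts'.length + 1 := by
        simp; omega
      rw [hcnt1, hcnt2, List.range_succ_eq_map, List.map_cons, List.map_map,
        List.append_assoc]
      congr 1
      rw [List.singleton_append]
      congr 1
      · -- window j = 0 is the buffer itself
        have : w ++ tok :: ts' = (w ++ [tok]) ++ ts' := by simp
        rw [List.drop_zero, this, ← h]
        rw [show w.length + 1 = (w ++ [tok]).length by simp]
        rw [List.take_left]
      · refine List.map_congr_left fun j _ => ?_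
        simp only [Function.comp]
        congr 2
        have h1 : w ++ tok :: ts' = (w ++ [tok]) ++ ts' := by simp
        have h2 : List.drop 1 (w ++ [tok] ++ ts') = List.drop 1 (w ++ [tok]) ++ ts' :=
          List.drop_append_of_le_length (by simp)
        rw [h1]
        calc List.drop j (List.drop 1 (w ++ [tok]) ++ ts')
            = List.drop j (List.drop 1 (w ++ [tok] ++ ts')) := by rw [h2]
          _ = List.drop j.succ (w ++ [tok] ++ ts') := by rw [List.drop_drop]; congr 1; omega
    · rw [if_neg (by simp; omega)]
      rw [ih (w ++ [tok]) _ (by simp; omega)]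
      simp only [List.length_append, List.length_cons, List.append_assoc, List.singleton_append]
      have h3 : w.length + (([] : List String).length + 1) + ts'.length + 1 - m
          = w.length + (ts'.length + 1) + 1 - m := by
        simp only [List.length_nil]; omega
      rw [h3]

-- B's per-sentence step, in the same closed window form
lemma bodyB_eq (tokens : List String) (n : Int) (hn : 1 ≤ n) (acc : List String) :
    (tokens.foldl (fun st tok =>
        let window := st.1 ++ [tok]
        if (window.length : Int) = n then
          (window.drop 1, st.2 ++ [PySem.Str.join " " window])
        else (window, st.2)) ([], acc)).2
    = acc ++ (List.range (tokens.length + 1 - n.toNat)).map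
        (fun j => PySem.Str.join " " ((tokens.drop j).take n.toNat)) := by
  have hfun : (fun (st : List String × List String) (tok : String) =>
        let window := st.1 ++ [tok]
        if (window.length : Int) = n then
          (window.drop 1, st.2 ++ [PySem.Str.join " " window])
        else (window, st.2))
      = (fun st tok =>
        let window := st.1 ++ [tok]
        if window.length = n.toNat then
          (window.drop 1, st.2 ++ [PySem.Str.join " " window])
        else (window, st.2)) := by
    funext st tok
    dsimp only
    congr 1
    exact propext (by omega)
  rw [hfun, streamFold n.toNat tokens [] acc (by simp; omega)]
  simp

-- the two folds agree sentence by sentence when 1 ≤ n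
lemma fold_eq (n : Int) (hn : 1 ≤ n) (sents : List String) : ∀ (acc : List String),
    sents.foldl (fun ngrams sent =>
      let tokens := (PySem.Str.split? sent " ").getD []
      if (tokens.length : Int) ≥ n then
        (PySem.List.pyRange 0 ((tokens.length : Int) - n + 1) 1).foldl
          (fun ngrams i =>
            ngrams ++ [PySem.Str.join " " (PySem.List.slice tokens (some i) (some (i + n)))])
          ngrams
      else ngrams) acc
    = sents.foldl (fun ngrams sent =>
      let tokens := (PySem.Str.split? sent " ").getD []
      (tokens.foldl (fun st tok =>
          let window := st.1 ++ [tok]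
          if (window.length : Int) = n then
            (window.drop 1, st.2 ++ [PySem.Str.join " " window])
          else (window, st.2)) ([], ngrams)).2) acc := by
  induction sents with
  | nil => intro acc; rfl
  | cons s rest ih =>
    intro acc
    rw [List.foldl_cons, List.foldl_cons, ih]
    congr 1
    exact (bodyA_eq _ n hn acc).trans (bodyB_eq _ n hn acc).symm

-- ===== VERDICT (by name: the statement is the Claim_ definition above) =====
theorem collect_all_ngrams_spec : Claim_equal_collect_all_ngrams := by
  intro sents n _ hn
  exact fold_eq n hn sents []
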